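-- pv_equiv track=rewrite | github.com/YuvantBesre/aapkapainter-tasks | individual_scores.py | get_individual_scores
-- ===== SOURCE A (Python) =====
-- def get_individual_scores(arr):
--     player_one_strike = True
--     player_one_score = 0
--     player_two_score = 0
--
--     for runs in arr:
--         if player_one_strike:
--             player_one_score += runs
--         else:
--             player_two_score += runs
--
--         if runs % 2 != 0:
--             player_one_strike = not player_one_strike
--
--     return f'P1 : {player_one_score}, P2 : {player_two_score}'
-- ===== SOURCE B (Python) =====
-- def get_individual_scores(arr):
--     # parity of odd runs strictly before each ball: 0 -> player one on strike
--     par = []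
--     p = 0
--     for runs in arr:
--         par.append(p)
--         p = (p + runs) % 2
--     p1 = sum(r for r, q in zip(arr, par) if q == 0)
--     p2 = sum(r for r, q in zip(arr, par) if q == 1)
--     return f'P1 : {p1}, P2 : {p2}'
-- ===== Notes on version B (the rewrite author's own statement) =====
-- stated objective: alternative
-- what changed: Replaces A's single stateful strike-toggling loop by a prefix-parity table (parity of odd runs strictly before each ball) followed by two partitioning sums over (run, parity) pairs.
import Mathlib
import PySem

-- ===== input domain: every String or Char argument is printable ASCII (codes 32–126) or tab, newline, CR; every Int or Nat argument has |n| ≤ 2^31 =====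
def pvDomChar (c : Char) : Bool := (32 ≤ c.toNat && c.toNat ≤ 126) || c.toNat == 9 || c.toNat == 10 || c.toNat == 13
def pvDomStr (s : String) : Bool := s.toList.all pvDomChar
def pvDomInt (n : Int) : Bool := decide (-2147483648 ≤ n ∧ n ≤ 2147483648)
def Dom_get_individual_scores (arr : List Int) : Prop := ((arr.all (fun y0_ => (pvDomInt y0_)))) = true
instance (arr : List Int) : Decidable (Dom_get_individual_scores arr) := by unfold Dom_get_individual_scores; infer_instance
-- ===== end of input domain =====

-- B replaces A's single stateful strike loop by a prefix-parity table plus two partitioning sums (objective: alternative decomposition, same cost).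

-- ===== PORT A =====
-- state: (player_one_strike, player_one_score, player_two_score)
def get_individual_scores (arr : List Int) : String :=
  let st := arr.foldl (fun (st : Bool × Int × Int) runs =>
      let st2 : Bool × Int × Int :=
        if st.1 then (st.1, st.2.1 + runs, st.2.2)
        else (st.1, st.2.1, st.2.2 + runs)
      if PySem.Int.mod runs 2 ≠ 0 then (!st2.1, st2.2.1, st2.2.2) else st2)
    (true, 0, 0)
  "P1 : " ++ PySem.Int.toStr st.2.1 ++ ", P2 : " ++ PySem.Int.toStr st.2.2

-- ===== PORT B =====
-- prefix-parity table 'par' (parity of odd runs strictly before each ball), then two partition sums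
def get_individual_scores_alt (arr : List Int) : String :=
  let bp := arr.foldl (fun (st : List Int × Int) runs =>
      (st.1 ++ [st.2], PySem.Int.mod (st.2 + runs) 2)) ([], 0)
  let p1 := ((arr.zip bp.1).filter (fun x => x.2 == 0)).foldl (fun a x => a + x.1) 0
  let p2 := ((arr.zip bp.1).filter (fun x => x.2 == 1)).foldl (fun a x => a + x.1) 0
  "P1 : " ++ PySem.Int.toStr p1 ++ ", P2 : " ++ PySem.Int.toStr p2

-- ===== PRECONDITION & SPEC =====
def Spec_get_individual_scores (arr : List Int) (out : String) : Prop := out = get_individual_scores_alt arr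
instance (arr : List Int) (out : String) : Decidable (Spec_get_individual_scores arr out) := by unfold Spec_get_individual_scores; infer_instance

-- ===== CLAIM (what is proved, stated in full; the proofs are below) =====
def Claim_equal_get_individual_scores : Prop := ∀ (arr : List Int), Dom_get_individual_scores arr → Spec_get_individual_scores arr (get_individual_scores arr)

-- ===== LEMMAS AND PROOFS =====

-- recursive characterisation of B's prefix-parity table
def pvParRec : List Int → Int → List Int
  | [], _ => []
  | r :: t, p => p :: pvParRec t (PySem.Int.mod (p + r) 2)

lemma pvBuild_eq : ∀ (arr : List Int) (acc : List Int) (p : Int),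
    (arr.foldl (fun (st : List Int × Int) runs =>
      (st.1 ++ [st.2], PySem.Int.mod (st.2 + runs) 2)) (acc, p)).1 = acc ++ pvParRec arr p := by
  intro arr
  induction arr with
  | nil => intro acc p; simp [pvParRec]
  | cons r t ih =>
    intro acc p
    simp only [List.foldl_cons]
    rw [ih]
    simp [pvParRec]

def pvS (arr : List Int) (p q : Int) : Int :=
  (((arr.zip (pvParRec arr p)).filter (fun x => x.2 == q)).map Prod.fst).sum

lemma pvS_cons (r : Int) (t : List Int) (p q : Int) :
    pvS (r :: t) p q = (if p == q then r else 0) + pvS t (PySem.Int.mod (p + r) 2) q := by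
  simp only [pvS, pvParRec, List.zip_cons_cons, List.filter_cons]
  split_ifs with h <;> simp_all

lemma pvMain : ∀ (arr : List Int) (strike : Bool) (a b : Int),
    (arr.foldl (fun (st : Bool × Int × Int) runs =>
      let st2 : Bool × Int × Int :=
        if st.1 then (st.1, st.2.1 + runs, st.2.2)
        else (st.1, st.2.1, st.2.2 + runs)
      if PySem.Int.mod runs 2 ≠ 0 then (!st2.1, st2.2.1, st2.2.2) else st2)
      (strike, a, b)).2
    = (a + pvS arr (if strike then 0 else 1) 0, b + pvS arr (if strike then 0 else 1) 1) := by
  intro arr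
  induction arr with
  | nil => intro strike a b; simp [pvS, pvParRec]
  | cons r t ih =>
    intro strike a b
    rw [List.foldl_cons]
    have hmod : PySem.Int.mod r 2 = r % 2 := PySem.Int.mod_eq_emod_of_pos (by norm_num)
    by_cases hm : PySem.Int.mod r 2 ≠ 0
    · have hr : r % 2 = 1 := by rw [hmod] at hm; omega
      have e0 : PySem.Int.mod (0 + r) 2 = 1 := by
        rw [PySem.Int.mod_eq_emod_of_pos (by norm_num)]; omega
      have e1 : PySem.Int.mod (1 + r) 2 = 0 := by
        rw [PySem.Int.mod_eq_emod_of_pos (by norm_num)]; omega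
      have f0 : (0 + r) % 2 = 1 := by omega
      have f1 : (1 + r) % 2 = 0 := by omega
      cases strike <;>
        simp only [hm, hr, Bool.false_eq_true, if_true, if_false,
          Bool.not_true, Bool.not_false] <;>
        rw [ih] <;> simp [pvS_cons, f0, f1, hr] <;> try ring
    · have hr : r % 2 = 0 := by rw [hmod] at hm; omega
      have e0 : PySem.Int.mod (0 + r) 2 = 0 := by
        rw [PySem.Int.mod_eq_emod_of_pos (by norm_num)]; omega
      have e1 : PySem.Int.mod (1 + r) 2 = 1 := by
        rw [PySem.Int.mod_eq_emod_of_pos (by norm_num)]; omega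
      have f0 : (0 + r) % 2 = 0 := by omega
      have f1 : (1 + r) % 2 = 1 := by omega
      cases strike <;>
        simp only [hm, hr, Bool.false_eq_true, if_true, if_false,
          Bool.not_true, Bool.not_false] <;>
        rw [ih] <;> simp [pvS_cons, f0, f1, hr] <;> try ring

lemma pvFoldl_add (l : List (Int × Int)) (c : Int) :
    l.foldl (fun a x => a + x.1) c = c + (l.map Prod.fst).sum := by
  induction l generalizing c with
  | nil => simp
  | cons x t ih => simp only [List.foldl_cons, ih, List.map_cons, List.sum_cons]; ring

-- ===== VERDICT (by name: the statement is the Claim_ definition above) =====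
theorem get_individual_scores_spec : Claim_equal_get_individual_scores := by
  intro arr _
  unfold Spec_get_individual_scores
  simp only [get_individual_scores, get_individual_scores_alt]
  rw [pvBuild_eq, pvMain]
  simp only [List.nil_append, if_true]
  rw [pvFoldl_add, pvFoldl_add]
  simp [pvS]
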